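-- pv_equiv track=rewrite | github.com/jswarburton/advent-of-code-2020 | main/day_06.py | count_everyone_in_group_answer_yes
-- ===== SOURCE A (Python) =====
-- def count_everyone_in_group_answer_yes(input: list) -> int:
--     total = 0
--     seen_in_group = set()
--     new_group = True
--     for line in input:
--         if not line:
--             total += len(seen_in_group)
--             seen_in_group = set()
--             new_group = True
--         elif new_group:
--             seen_in_group = set(line)
--             new_group = False
--         else:
--             seen_in_group = seen_in_group.intersection(list(line))
--
--     total += len(seen_in_group)
--
--     return total
-- ===== SOURCE B (Python) =====
-- def count_everyone_in_group_answer_yes(input: list) -> int: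
--     # Phase 1: partition the lines into groups at empty lines.
--     groups = []
--     current = []
--     for line in input:
--         if line:
--             current.append(line)
--         else:
--             groups.append(current)
--             current = []
--     groups.append(current)
--     # Phase 2: sum, over non-empty groups, the size of the intersection
--     # of the character sets of the group's lines.
--     return sum(len(set.intersection(*map(set, g))) for g in groups if g)
-- ===== Notes on version B (the rewrite author's own statement) =====
-- stated objective: idiomatic
-- what changed: Replaces A's single stateful loop (running intersection set plus new_group flag plus running total) by a two-phase decomposition: first partition the lines into groups at empty lines, then sum len(set.intersection(*map(set, g))) over the non-empty groups.
import Mathlib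
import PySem

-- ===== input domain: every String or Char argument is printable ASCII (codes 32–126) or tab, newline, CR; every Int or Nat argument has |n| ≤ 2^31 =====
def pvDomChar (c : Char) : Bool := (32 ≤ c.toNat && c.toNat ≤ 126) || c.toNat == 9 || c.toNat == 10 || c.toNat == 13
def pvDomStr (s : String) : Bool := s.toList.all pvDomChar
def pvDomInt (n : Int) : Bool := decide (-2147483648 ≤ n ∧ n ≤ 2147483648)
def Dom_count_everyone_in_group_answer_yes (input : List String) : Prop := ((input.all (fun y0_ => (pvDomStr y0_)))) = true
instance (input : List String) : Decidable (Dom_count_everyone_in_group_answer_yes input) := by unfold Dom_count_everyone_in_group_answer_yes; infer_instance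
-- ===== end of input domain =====

-- B restructures A's single stateful loop into two phases (partition into groups, then
-- sum per-group intersection sizes); equivalence of the return value is proved below.

-- ===== PORT A =====
-- the loop body: state = (total, seen_in_group, new_group)
def pvStepA (st : Int × PySem.Set Char × Bool) (line : String) : Int × PySem.Set Char × Bool :=
  if line = "" then (st.1 + PySem.Set.len st.2.1, PySem.Set.empty, true)
  else if st.2.2 then (st.1, PySem.Set.ofList line.toList, false)
  else (st.1, PySem.Set.inter st.2.1 line.toList, false)

def count_everyone_in_group_answer_yes (input : List String) : Int :=
  let st := input.foldl pvStepA (0, PySem.Set.empty, true)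
  st.1 + PySem.Set.len st.2.1

-- ===== PORT B =====
-- phase 1 of Source B: partition lines into groups at empty lines ('current' accumulates)
def pvSplitGroups (current : List String) : List String → List (List String)
  | [] => [current]
  | l :: ls => if l = "" then current :: pvSplitGroups [] ls else pvSplitGroups (current ++ [l]) ls

-- len(set.intersection(*map(set, g))) for non-empty g; an empty group is skipped (contributes 0)
def pvGroupCount (g : List String) : Int :=
  match g with
  | [] => 0
  | h :: t => PySem.Set.len ((t.map (fun l => PySem.Set.ofList l.toList)).foldl PySem.Set.inter (PySem.Set.ofList h.toList))

def count_everyone_in_group_answer_yes_alt (input : List String) : Int :=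
  ((pvSplitGroups [] input).map pvGroupCount).sum

-- ===== PRECONDITION & SPEC =====
def Spec_count_everyone_in_group_answer_yes (input : List String) (out : Int) : Prop := out = count_everyone_in_group_answer_yes_alt input
instance (input : List String) (out : Int) : Decidable (Spec_count_everyone_in_group_answer_yes input out) := by unfold Spec_count_everyone_in_group_answer_yes; infer_instance

-- ===== CLAIM (what is proved, stated in full; the proofs are below) =====
def Claim_equal_count_everyone_in_group_answer_yes : Prop := ∀ (input : List String), Dom_count_everyone_in_group_answer_yes input → Spec_count_everyone_in_group_answer_yes input (count_everyone_in_group_answer_yes input)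

-- ===== LEMMAS AND PROOFS =====

-- intersecting with a raw character list or with its set gives the same set
theorem pvInter_ofList (s : PySem.Set Char) (l : List Char) :
    PySem.Set.inter s l = PySem.Set.inter s (PySem.Set.ofList l) := by
  simp only [PySem.Set.inter]
  apply List.filter_congr
  intro x _
  simp [PySem.Set.contains, PySem.Set.mem_ofList]

-- the intersection set B maintains over a group h :: t
def pvInterSets (h : String) (t : List String) : PySem.Set Char :=
  (t.map (fun l => PySem.Set.ofList l.toList)).foldl PySem.Set.inter (PySem.Set.ofList h.toList)

theorem pvInterSets_append (h : String) (t : List String) (l : String) :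
    pvInterSets h (t ++ [l]) = PySem.Set.inter (pvInterSets h t) (PySem.Set.ofList l.toList) := by
  simp [pvInterSets]

-- the loop invariant: A's fold from state (t, s, ng) equals t plus B's group sums of the
-- remaining lines, provided s is the intersection set of the current partial group
theorem pvMain (ls : List String) (t : Int) (s : PySem.Set Char) (ng : Bool) (cur : List String)
    (h : if ng then cur = [] ∧ s = [] else ∃ hd tl, cur = hd :: tl ∧ s = pvInterSets hd tl) :
    (ls.foldl pvStepA (t, s, ng)).1 + PySem.Set.len (ls.foldl pvStepA (t, s, ng)).2.1
      = t + ((pvSplitGroups cur ls).map pvGroupCount).sum := by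
  induction ls generalizing t s ng cur with
  | nil =>
    simp only [List.foldl_nil, pvSplitGroups, List.map_cons, List.map_nil, List.sum_cons,
      List.sum_nil, add_zero]
    cases ng with
    | true =>
      obtain ⟨hc, hs⟩ := h
      subst hc hs
      simp [pvGroupCount, PySem.Set.len]
    | false =>
      obtain ⟨hd, tl, hc, hs⟩ := h
      subst hc hs
      simp [pvGroupCount, pvInterSets]
  | cons l ls ih =>
    by_cases hl : l = ""
    · subst hl
      have hlen : PySem.Set.len s = pvGroupCount cur := by
        cases ng with
        | true =>
          obtain ⟨hc, hs⟩ := h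
          subst hc hs
          simp [pvGroupCount, PySem.Set.len]
        | false =>
          obtain ⟨hd, tl, hc, hs⟩ := h
          subst hc hs
          simp [pvGroupCount, pvInterSets]
      have := ih (t + PySem.Set.len s) PySem.Set.empty true []
        (by simp [PySem.Set.empty])
      simp only [List.foldl_cons, pvStepA, if_true] at *
      rw [this, hlen]
      simp [pvSplitGroups]
      ring
    · cases ng with
      | true =>
        obtain ⟨hc, hs⟩ := h
        subst hc
        have := ih t (PySem.Set.ofList l.toList) false [l]
          ⟨l, [], rfl, by simp [pvInterSets]⟩
        simp only [List.foldl_cons, pvStepA, if_neg hl, if_true] at *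
        rw [this]
        simp [pvSplitGroups, hl]
      | false =>
        obtain ⟨hd, tl, hc, hs⟩ := h
        subst hc hs
        have := ih t (PySem.Set.inter (pvInterSets hd tl) l.toList) false (hd :: (tl ++ [l]))
          ⟨hd, tl ++ [l], rfl, by rw [pvInterSets_append, pvInter_ofList]⟩
        simp only [List.foldl_cons, pvStepA, if_neg hl, Bool.false_eq_true, if_false] at *
        rw [this]
        simp [pvSplitGroups, hl]

-- ===== VERDICT (by name: the statement is the Claim_ definition above) =====
theorem count_everyone_in_group_answer_yes_spec : Claim_equal_count_everyone_in_group_answer_yes := by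
  intro input _
  show _ = _
  unfold count_everyone_in_group_answer_yes count_everyone_in_group_answer_yes_alt
  exact pvMain input 0 PySem.Set.empty true [] (by simp [PySem.Set.empty]) |>.trans (by ring)
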